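-- pv_equiv track=rewrite | github.com/jagdeep222422/NinjaSlayground_21days | 8_termsofAP.py | termsOfAP
-- ===== SOURCE A (Python) =====
-- def termsOfAP(x):
--     # Write your code here
--     # Return a list of integers
--     ans = []
--     temp = 0
--     n = 1
--     count = 0
--     while count != x:
--         temp = 3 * n + 2
--         if temp % 4 != 0:
--             ans.append(temp)
--             count += 1
--         n += 1
--     return ans
-- ===== SOURCE B (Python) =====
-- def termsOfAP(x):
--     ans = []
--     for k in range(x):
--         block = k // 3
--         pos = k % 3
--         n = 4 * block + (1 if pos == 0 else 3 if pos == 1 else 4)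
--         ans.append(3 * n + 2)
--     return ans
-- ===== Notes on version B (the rewrite author's own statement) =====
-- stated objective: simpler
-- what changed: Replaced A's scan of all n with a modulo-4 divisibility filter by a direct closed-form computation of the k-th kept term (n = 4*(k//3) + (1,3,4)[k%3]) over range(x), removing the skip/filter loop; Pre_ excludes x < 0, where A's while-loop never terminates.
import Mathlib
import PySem

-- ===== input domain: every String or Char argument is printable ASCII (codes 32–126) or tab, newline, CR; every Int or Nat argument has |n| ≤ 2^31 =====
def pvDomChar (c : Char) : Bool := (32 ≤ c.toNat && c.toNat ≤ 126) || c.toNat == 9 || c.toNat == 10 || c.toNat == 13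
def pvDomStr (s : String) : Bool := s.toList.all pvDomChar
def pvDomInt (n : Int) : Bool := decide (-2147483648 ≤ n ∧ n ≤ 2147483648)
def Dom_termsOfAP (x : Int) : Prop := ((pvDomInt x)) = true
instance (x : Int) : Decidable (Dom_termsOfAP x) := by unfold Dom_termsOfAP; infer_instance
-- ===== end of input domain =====

-- B replaces A's scan-and-filter while-loop by a closed form for each kept term
-- (k-th term: n = 4*(k//3) + (1,3,4)[k%3]); objective: simpler.

-- ===== PORT A =====
-- A's while-loop, fuel-bounded only to make it total in Lean; the fuel 2*x.toNat+2
-- always suffices when the loop terminates in Python (x ≥ 0).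
def termsOfAPLoop (x : Int) (fuel : Nat) (count n : Int) (ans : List Int) : List Int :=
  match fuel with
  | 0 => ans
  | Nat.succ fuel' =>
    if count = x then ans
    else
      let temp := 3 * n + 2
      if PySem.Int.mod temp 4 ≠ 0 then
        termsOfAPLoop x fuel' (count + 1) (n + 1) (ans ++ [temp])
      else
        termsOfAPLoop x fuel' count (n + 1) ans

def termsOfAP (x : Int) : List Int :=
  termsOfAPLoop x (2 * x.toNat + 2) 0 1 []

-- ===== PORT B =====
def termsOfAP_alt (x : Int) : List Int :=
  (PySem.List.pyRange 0 x 1).map (fun k =>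
    let block := PySem.Int.floordiv k 3
    let pos := PySem.Int.mod k 3
    let n := 4 * block + (if pos = 0 then 1 else if pos = 1 then 3 else 4)
    3 * n + 2)

-- ===== PRECONDITION & SPEC =====
-- Pre_ excludes x < 0, where A's while-loop never terminates (count never equals x).
def Pre_termsOfAP (x : Int) : Prop := 0 ≤ x
instance (x : Int) : Decidable (Pre_termsOfAP x) := by unfold Pre_termsOfAP; infer_instance
def pvWitness_termsOfAP : Int := 3

def Spec_termsOfAP (x : Int) (out : List Int) : Prop := out = termsOfAP_alt x
instance (x : Int) (out : List Int) : Decidable (Spec_termsOfAP x out) := by unfold Spec_termsOfAP; infer_instance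

-- ===== CLAIM (what is proved, stated in full; the proofs are below) =====
def Claim_equal_termsOfAP : Prop := ∀ (x : Int), Dom_termsOfAP x → Pre_termsOfAP x → Spec_termsOfAP x (termsOfAP x)

-- ===== LEMMAS AND PROOFS =====

-- the n-value at which the c-th kept term (0-based) is found
def nstart (c : Nat) : Int :=
  4 * ((c / 3 : Nat) : Int) + (if c % 3 = 0 then 1 else if c % 3 = 1 then 3 else 4)

theorem loop_eq (d : Nat) : ∀ (c : Nat) (ans : List Int) (fuel : Nat), 2 * d + 1 ≤ fuel →
    termsOfAPLoop (((c : Int) + (d : Int))) fuel (c : Int) (nstart c) ans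
      = ans ++ (List.range' c d).map (fun k => 3 * nstart k + 2) := by
  induction d with
  | zero =>
    intro c ans fuel hf
    cases fuel with
    | zero => omega
    | succ f =>
      simp [termsOfAPLoop]
  | succ d ih =>
    intro c ans fuel hf
    cases fuel with
    | zero => omega
    | succ f =>
      have hne : (c : Int) ≠ (c : Int) + ((d : Nat) + 1 : Nat) := by push_cast; omega
      have hb : nstart c = 4 * ((c / 3 : Nat) : Int) + (if c % 3 = 0 then 1 else if c % 3 = 1 then 3 else 4) := rfl
      have hrange : List.range' c (d + 1) = c :: List.range' (c + 1) d := by rw [List.range'_succ]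
      by_cases h0 : c % 3 = 0
      · -- keep at n = 4b+1, then (if more terms are needed) skip at n = 4b+2
        have hkeep : PySem.Int.mod (3 * nstart c + 2) 4 ≠ 0 := by
          rw [PySem.Int.mod_eq_emod_of_pos (by norm_num)]
          simp [nstart, h0]; omega
        have hn1 : nstart (c + 1) = 4 * ((c / 3 : Nat) : Int) + 3 := by
          have h1 : (c + 1) / 3 = c / 3 := by omega
          have h2 : (c + 1) % 3 = 1 := by omega
          simp only [nstart, h1, h2]; norm_num
        rcases Nat.eq_zero_or_pos d with hd | hd
        · subst hd
          cases f with
          | zero => omega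
          | succ f' =>
            simp only [termsOfAPLoop, if_neg hne, if_pos hkeep]
            have : (c : Int) + 1 = (c : Int) + ((0:Nat) + 1 : Nat) := by push_cast; ring
            simp [hrange]
        · cases f with
          | zero => omega
          | succ f' =>
            simp only [termsOfAPLoop, if_neg hne, if_pos hkeep]
            have hne2 : (c : Int) + 1 ≠ (c : Int) + ((d : Nat) + 1 : Nat) := by push_cast; omega
            have hskip : PySem.Int.mod (3 * (nstart c + 1) + 2) 4 = 0 := by
              rw [PySem.Int.mod_eq_emod_of_pos (by norm_num)]
              simp [nstart, h0]; omega
            simp only [if_neg hne2, if_neg (not_not_intro hskip)]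
            have hstep : nstart c + 1 + 1 = nstart (c + 1) := by
              rw [hn1]; simp only [nstart, h0]; norm_num; omega
            have hcast : (c : Int) + ((d : Nat) + 1 : Nat) = ((c + 1 : Nat) : Int) + (d : Int) := by push_cast; ring
            have hcnt : (c : Int) + 1 = ((c + 1 : Nat) : Int) := by push_cast; ring
            rw [hstep, hcast, hcnt, ih (c + 1) _ f' (by omega), hrange]
            simp
      · -- keep at n ≡ 3 or 0 (mod 4); next n is already nstart (c+1)
        have hkeep : PySem.Int.mod (3 * nstart c + 2) 4 ≠ 0 := by
          rw [PySem.Int.mod_eq_emod_of_pos (by norm_num)]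
          rcases (by omega : c % 3 = 1 ∨ c % 3 = 2) with h | h <;> simp [nstart, h] <;> omega
        have hstep : nstart c + 1 = nstart (c + 1) := by
          rcases (by omega : c % 3 = 1 ∨ c % 3 = 2) with h | h
          · have h1 : (c + 1) / 3 = c / 3 := by omega
            have h2 : (c + 1) % 3 = 2 := by omega
            simp only [nstart, h, h1, h2]; norm_num; omega
          · have h1 : (c + 1) / 3 = c / 3 + 1 := by omega
            have h2 : (c + 1) % 3 = 0 := by omega
            simp only [nstart, h, h1, h2]; norm_num; omega
        simp only [termsOfAPLoop, if_neg hne, if_pos hkeep]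
        have hcast : (c : Int) + ((d : Nat) + 1 : Nat) = ((c + 1 : Nat) : Int) + (d : Int) := by push_cast; ring
        have hcnt : (c : Int) + 1 = ((c + 1 : Nat) : Int) := by push_cast; ring
        rw [hstep, hcast, hcnt, ih (c + 1) _ f (by omega), hrange]
        simp

theorem alt_eq (m : Nat) :
    termsOfAP_alt (m : Int) = (List.range' 0 m).map (fun k => 3 * nstart k + 2) := by
  unfold termsOfAP_alt
  rw [PySem.List.pyRange_zero_nat]
  rw [List.map_map, ← List.range_eq_range']
  refine List.map_congr_left ?_
  intro k _
  simp only [Function.comp, nstart]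
  have h1 : PySem.Int.floordiv (k : Int) 3 = ((k / 3 : Nat) : Int) := by
    exact_mod_cast PySem.Int.floordiv_natCast k 3
  have h2 : PySem.Int.mod (k : Int) 3 = ((k % 3 : Nat) : Int) := by
    exact_mod_cast PySem.Int.mod_natCast k 3
  simp only [h1, h2]
  rcases (by omega : k % 3 = 0 ∨ k % 3 = 1 ∨ k % 3 = 2) with h | h | h <;> simp [h]

-- ===== VERDICT (by name: the statement is the Claim_ definition above) =====
theorem termsOfAP_spec : Claim_equal_termsOfAP := by
  intro x _ hx
  unfold Spec_termsOfAP termsOfAP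
  obtain ⟨m, rfl⟩ : ∃ m : Nat, x = (m : Int) := ⟨x.toNat, (Int.toNat_of_nonneg hx).symm⟩
  have h0 : nstart 0 = 1 := by simp [nstart]
  have := loop_eq m 0 [] (2 * (m : Int).toNat + 2) (by omega)
  simp only [Nat.cast_zero, zero_add, h0] at this
  rw [this, alt_eq]
  simp
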